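-- pv_equiv track=rewrite | github.com/patrick-g-zhang/cFrontEnd | src/create_label_state.py | pos_syl_in_word
-- ===== SOURCE A (Python) =====
-- def pos_syl_in_word(char_index, word_map):
--     word_index = word_map[char_index]
--     word_index_list = []
--     for key,value in word_map.items():
--         if value == word_index:
--             word_index_list.append(key)
--     word_len = len(word_index_list)
--     fw_syl_pos = word_index_list.index(char_index) + 1
--     bw_syl_pos = word_len - fw_syl_pos + 1
--     return  fw_syl_pos, bw_syl_pos, word_index, word_len
-- ===== SOURCE B (Python) =====
-- def pos_syl_in_word(char_index, word_map):
--     word_index = word_map[char_index]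
--     word_len = 0
--     fw_syl_pos = 0
--     seen = False
--     for key, value in word_map.items():
--         if value == word_index:
--             word_len += 1
--             if not seen:
--                 fw_syl_pos += 1
--         if key == char_index:
--             seen = True
--     bw_syl_pos = word_len - fw_syl_pos + 1
--     return fw_syl_pos, bw_syl_pos, word_index, word_len
-- ===== Notes on version B (the rewrite author's own statement) =====
-- stated objective: alternative
-- what changed: Replaces A's materialize-the-matching-key-list followed by a .index rescan and len with a single accumulating pass over word_map.items() maintaining word_len, fw_syl_pos and a seen flag; no intermediate list is built.
import Mathlib
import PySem

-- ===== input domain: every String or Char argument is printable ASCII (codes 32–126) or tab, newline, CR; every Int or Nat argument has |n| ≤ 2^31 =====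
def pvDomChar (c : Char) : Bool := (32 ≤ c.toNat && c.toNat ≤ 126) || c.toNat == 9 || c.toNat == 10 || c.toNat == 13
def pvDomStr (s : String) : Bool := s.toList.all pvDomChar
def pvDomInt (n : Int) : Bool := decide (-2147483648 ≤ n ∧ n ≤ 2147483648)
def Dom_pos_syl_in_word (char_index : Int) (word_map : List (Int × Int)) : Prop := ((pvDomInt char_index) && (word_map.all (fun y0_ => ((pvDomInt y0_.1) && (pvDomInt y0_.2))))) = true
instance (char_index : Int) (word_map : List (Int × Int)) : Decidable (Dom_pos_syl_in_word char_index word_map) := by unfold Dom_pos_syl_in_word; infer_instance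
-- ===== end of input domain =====

-- B replaces A's build-list-then-.index/len rescans with one accumulating pass (alternative decomposition, same cost).


-- ===== PORT A =====
def pos_syl_in_word (char_index : Int) (word_map : List (Int × Int)) : Int × Int × Int × Int :=
  -- word_index = word_map[char_index] (first match; Pre_ guarantees the key is present)
  let word_index : Int := ((word_map.find? (fun kv => kv.1 == char_index)).map Prod.snd).getD 0
  -- the populate loop building word_index_list
  let word_index_list : List Int :=
    word_map.foldl (fun acc kv => if kv.2 == word_index then acc ++ [kv.1] else acc) []
  let word_len : Int := (word_index_list.length : Int)
  -- .index (+1); Pre_ guarantees char_index ∈ word_index_list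
  let fw_syl_pos : Int := (((PySem.List.index? word_index_list char_index).getD 0 : Nat) : Int) + 1
  let bw_syl_pos : Int := word_len - fw_syl_pos + 1
  (fw_syl_pos, bw_syl_pos, word_index, word_len)

-- ===== PORT B =====
-- loop step of Source B: state = (word_len, fw_syl_pos, seen)
def pswStep (char_index word_index : Int) (s : Int × Int × Bool) (kv : Int × Int) : Int × Int × Bool :=
  let s := if kv.2 == word_index then (s.1 + 1, s.2.1 + (if s.2.2 then 0 else 1), s.2.2) else s
  if kv.1 == char_index then (s.1, s.2.1, true) else s

def pos_syl_in_word_alt (char_index : Int) (word_map : List (Int × Int)) : Int × Int × Int × Int :=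
  let word_index : Int := ((word_map.find? (fun kv => kv.1 == char_index)).map Prod.snd).getD 0
  let st := word_map.foldl (pswStep char_index word_index) (0, 0, false)
  (st.2.1, st.1 - st.2.1 + 1, word_index, st.1)

-- ===== PRECONDITION & SPEC =====
-- Pre_ requires char_index to be a key (otherwise Python A raises KeyError on word_map[char_index])
-- and, since the argument encodes a Python dict, the keys to be distinct (duplicate-key lists
-- represent no dict and are never produced by the type convention).
def Pre_pos_syl_in_word (char_index : Int) (word_map : List (Int × Int)) : Prop :=
  char_index ∈ word_map.map Prod.fst ∧ (word_map.map Prod.fst).Nodup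
instance (char_index : Int) (word_map : List (Int × Int)) : Decidable (Pre_pos_syl_in_word char_index word_map) := by unfold Pre_pos_syl_in_word; infer_instance

def pvWitness_pos_syl_in_word : Int × (List (Int × Int)) := (2, [(1, 0), (2, 0), (3, 1)])

def Spec_pos_syl_in_word (char_index : Int) (word_map : List (Int × Int)) (out : Int × Int × Int × Int) : Prop := out = pos_syl_in_word_alt char_index word_map
instance (char_index : Int) (word_map : List (Int × Int)) (out : Int × Int × Int × Int) : Decidable (Spec_pos_syl_in_word char_index word_map out) := by unfold Spec_pos_syl_in_word; infer_instance

-- ===== CLAIM (what is proved, stated in full; the proofs are below) =====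
def Claim_equal_pos_syl_in_word : Prop := ∀ (char_index : Int) (word_map : List (Int × Int)), Dom_pos_syl_in_word char_index word_map → Pre_pos_syl_in_word char_index word_map → Spec_pos_syl_in_word char_index word_map (pos_syl_in_word char_index word_map)

-- ===== LEMMAS AND PROOFS =====

-- once seen = true, only word_len still grows
theorem pswStep_seen (ci wi : Int) (l : List (Int × Int)) (a b : Int) :
    l.foldl (pswStep ci wi) (a, b, true) =
      (a + (l.countP (fun kv => kv.2 == wi) : Int), b, true) := by
  induction l generalizing a b with
  | nil => simp
  | cons kv t ih =>
    simp only [List.foldl_cons, List.countP_cons, pswStep]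
    by_cases hv : kv.2 = wi <;> by_cases hk : kv.1 = ci <;>
      simp [hv, hk, ih, Prod.ext_iff] <;> omega

-- before char_index has been met, word_len and fw_syl_pos grow together
theorem pswStep_unseen (ci wi : Int) (l : List (Int × Int)) (a b : Int)
    (h : ∀ kv ∈ l, kv.1 ≠ ci) :
    l.foldl (pswStep ci wi) (a, b, false) =
      (a + (l.countP (fun kv => kv.2 == wi) : Int),
       b + (l.countP (fun kv => kv.2 == wi) : Int), false) := by
  induction l generalizing a b with
  | nil => simp
  | cons kv t ih =>
    have hk : kv.1 ≠ ci := h kv (by simp)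
    have ht : ∀ kv ∈ t, kv.1 ≠ ci := fun x hx => h x (by simp [hx])
    simp only [List.foldl_cons, List.countP_cons, pswStep]
    by_cases hv : kv.2 = wi <;>
      simp [hv, hk, ih _ _ ht, Prod.ext_iff] <;> omega

-- the first match of the key ci in the split list
theorem psw_find (ci wi : Int) (pre suf : List (Int × Int))
    (h : ∀ kv ∈ pre, kv.1 ≠ ci) :
    List.find? (fun kv => kv.1 == ci) (pre ++ (ci, wi) :: suf) = some (ci, wi) := by
  induction pre with
  | nil => simp
  | cons kv t ih =>
    have hk : kv.1 ≠ ci := h kv (by simp)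
    simp [hk, ih (fun x hx => h x (by simp [hx]))]

-- split a list at the first occurrence of the key ci
theorem psw_split (ci : Int) (wm : List (Int × Int)) (h : ci ∈ wm.map Prod.fst) :
    ∃ wi pre suf, wm = pre ++ (ci, wi) :: suf ∧ ∀ kv ∈ pre, kv.1 ≠ ci := by
  induction wm with
  | nil => simp at h
  | cons kv t ih =>
    by_cases hk : kv.1 = ci
    · exact ⟨kv.2, [], t, by simp [← hk], by simp⟩
    · have h' : ci ∈ t.map Prod.fst := by
        rcases List.mem_map.1 h with ⟨x, hx, he⟩
        rcases List.mem_cons.1 hx with rfl | hx2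
        · exact absurd he hk
        · exact List.mem_map.2 ⟨x, hx2, he⟩
      obtain ⟨wi, pre, suf, he, hp⟩ := ih h'
      refine ⟨wi, kv :: pre, suf, by simp [he], ?_⟩
      intro x hx
      rcases List.mem_cons.1 hx with rfl | hx
      · exact hk
      · exact hp x hx

-- ===== VERDICT (by name: the statement is the Claim_ definition above) =====
theorem pos_syl_in_word_spec : Claim_equal_pos_syl_in_word := by
  intro ci wm _ hpre
  obtain ⟨hmem, hnd⟩ := hpre
  obtain ⟨wi, pre, suf, rfl, hp⟩ := psw_split ci wm hmem
  have hnd' : (pre.map Prod.fst ++ ci :: suf.map Prod.fst).Nodup := by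
    simpa using hnd
  have hnd2 : (ci :: suf.map Prod.fst).Nodup :=
    (List.sublist_append_right _ _).nodup hnd'
  have hcs : ci ∉ suf.map Prod.fst := (List.nodup_cons.mp hnd2).1
  have hs : ∀ kv ∈ suf, kv.1 ≠ ci := fun kv hkv heq =>
    hcs (List.mem_map.2 ⟨kv, hkv, heq⟩)
  have hfind : List.find? (fun kv => kv.1 == ci) (pre ++ (ci, wi) :: suf) = some (ci, wi) :=
    psw_find ci wi pre suf hp
  have hwil : (pre ++ (ci, wi) :: suf).foldl
      (fun acc kv => if kv.2 == wi then acc ++ [kv.1] else acc) [] =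
      (pre.filter (fun kv => kv.2 == wi)).map Prod.fst ++
        ci :: (suf.filter (fun kv => kv.2 == wi)).map Prod.fst := by
    rw [PySem.List.foldl_append_if]
    simp [List.filter_append]
  have hnp : ci ∉ (pre.filter (fun kv => kv.2 == wi)).map Prod.fst := by
    intro h
    obtain ⟨kv, hkv, he⟩ := List.mem_map.1 h
    exact hp kv (List.mem_of_mem_filter hkv) he
  have hidx : PySem.List.index?
      ((pre.filter (fun kv => kv.2 == wi)).map Prod.fst ++
        ci :: (suf.filter (fun kv => kv.2 == wi)).map Prod.fst) ci =
      some ((pre.filter (fun kv => kv.2 == wi)).map Prod.fst).length := by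
    rw [show (pre.filter (fun kv => kv.2 == wi)).map Prod.fst ++
        ci :: (suf.filter (fun kv => kv.2 == wi)).map Prod.fst =
        ((pre.filter (fun kv => kv.2 == wi)).map Prod.fst ++ [ci]) ++
        (suf.filter (fun kv => kv.2 == wi)).map Prod.fst by simp]
    rw [PySem.List.index?_append_of_mem _ (by simp : ci ∈ (pre.filter (fun kv => kv.2 == wi)).map Prod.fst ++ [ci])]
    apply PySem.List.index?_append_singleton_self
    exact hnp
  have hB : (pre ++ (ci, wi) :: suf).foldl (pswStep ci wi) (0, 0, false) =
      ((pre.countP (fun kv => kv.2 == wi) : Int) + 1 +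
        (suf.countP (fun kv => kv.2 == wi) : Int),
       (pre.countP (fun kv => kv.2 == wi) : Int) + 1, true) := by
    rw [List.foldl_append, pswStep_unseen ci wi pre 0 0 hp, List.foldl_cons]
    have hstep : pswStep ci wi
        ((0 : Int) + (pre.countP (fun kv => kv.2 == wi) : Int),
         (0 : Int) + (pre.countP (fun kv => kv.2 == wi) : Int), false) (ci, wi) =
        ((pre.countP (fun kv => kv.2 == wi) : Int) + 1,
         (pre.countP (fun kv => kv.2 == wi) : Int) + 1, true) := by
      simp [pswStep]
    rw [hstep, pswStep_seen]
  show pos_syl_in_word ci (pre ++ (ci, wi) :: suf) = pos_syl_in_word_alt ci (pre ++ (ci, wi) :: suf)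
  simp only [pos_syl_in_word, pos_syl_in_word_alt, hfind, Option.map_some, Option.getD_some,
    hwil, hidx, hB, Option.getD_some]
  simp [Prod.ext_iff, List.countP_eq_length_filter]
  omega
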